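-- pv_equiv track=rewrite | github.com/pavani1092/Machine-Learning | Homework 2/5523_decision_trees-master/id3.py | CountVal
-- ===== SOURCE A (Python) =====
-- POS_CLASS = 'e'
--
-- def CountVal(data):
--     (pos,neg)=(0,0)
--     for d in data:
--         if d[0]==POS_CLASS:
--             pos+=1
--         else:
--             neg+=1
--     return (pos,neg)
-- ===== SOURCE B (Python) =====
-- POS_CLASS = 'e'
--
-- def CountVal(data):
--     # Divide and conquer: split the list in half, count each half recursively,
--     # and add the two (pos, neg) pairs.
--     if not data:
--         return (0, 0)
--     if len(data) == 1:
--         return (1, 0) if data[0][0] == POS_CLASS else (0, 1)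
--     mid = len(data) // 2
--     p1, n1 = CountVal(data[:mid])
--     p2, n2 = CountVal(data[mid:])
--     return (p1 + p2, n1 + n2)
-- ===== Notes on version B (the rewrite author's own statement) =====
-- stated objective: alternative
-- what changed: B replaces A's single linear pass with two parallel accumulators by a divide-and-conquer recursion that splits the list in half, counts each half recursively, and adds the two (pos, neg) pairs.
import Mathlib
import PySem

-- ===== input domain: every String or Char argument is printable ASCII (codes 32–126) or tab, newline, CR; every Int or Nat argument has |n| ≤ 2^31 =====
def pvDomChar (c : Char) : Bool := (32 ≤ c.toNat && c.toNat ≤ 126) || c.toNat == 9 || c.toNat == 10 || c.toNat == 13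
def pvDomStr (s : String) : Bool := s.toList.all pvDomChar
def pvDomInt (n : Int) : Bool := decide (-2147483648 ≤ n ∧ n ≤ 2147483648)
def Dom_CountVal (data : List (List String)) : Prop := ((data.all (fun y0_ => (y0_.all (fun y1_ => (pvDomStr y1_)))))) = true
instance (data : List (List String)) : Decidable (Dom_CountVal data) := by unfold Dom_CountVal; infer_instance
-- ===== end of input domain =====

-- B replaces A's linear two-accumulator loop by a halve-and-recurse count; objective: alternative algorithm, same result.

-- ===== PORT A =====
-- A: loop over data with two accumulators (pos, neg), branching on d[0] == 'e'.
-- d[0] raises IndexError on an empty row; Pre_ excludes that, so head? = some _ there.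
def CountVal (data : List (List String)) : Int × Int :=
  data.foldl
    (fun (acc : Int × Int) d =>
      if d.head? = some "e" then (acc.1 + 1, acc.2) else (acc.1, acc.2 + 1))
    (0, 0)

-- ===== PORT B =====
-- B: divide and conquer — split at len//2, recurse on both halves, add the pairs.
-- data[:mid] / data[mid:] are PySem.List.slice_to / slice_from with a nonnegative
-- in-range index, i.e. List.take / List.drop.
def CountVal_alt (data : List (List String)) : Int × Int :=
  match _h : data with
  | [] => (0, 0)
  | [d] => if d.head? = some "e" then (1, 0) else (0, 1)
  | _ :: _ :: _ =>
    let mid := data.length / 2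
    let r1 := CountVal_alt (data.take mid)
    let r2 := CountVal_alt (data.drop mid)
    (r1.1 + r2.1, r1.2 + r2.2)
termination_by data.length
decreasing_by
  · subst _h; simp [List.length_take]; omega
  · subst _h; simp; omega

-- ===== PRECONDITION & SPEC =====
-- Pre_ excludes inputs containing an empty row, on which A (and B) raise IndexError at d[0].
def Pre_CountVal (data : List (List String)) : Prop := ∀ d ∈ data, d ≠ []
instance (data : List (List String)) : Decidable (Pre_CountVal data) := by unfold Pre_CountVal; infer_instance
def pvWitness_CountVal : List (List String) := [["e", "x"], ["p", "y"], ["e"]]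
def Spec_CountVal (data : List (List String)) (out : Int × Int) : Prop := out = CountVal_alt data
instance (data : List (List String)) (out : Int × Int) : Decidable (Spec_CountVal data out) := by unfold Spec_CountVal; infer_instance

-- ===== CLAIM (what is proved, stated in full; the proofs are below) =====
def Claim_equal_CountVal : Prop := ∀ (data : List (List String)), Dom_CountVal data → Pre_CountVal data → Spec_CountVal data (CountVal data)

-- ===== LEMMAS AND PROOFS =====
-- Both ports compute (countP, length - countP); we prove each equal to that closed form.
theorem CountVal_foldl (data : List (List String)) (p n : Int) :
    data.foldl
      (fun (acc : Int × Int) d =>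
        if d.head? = some "e" then (acc.1 + 1, acc.2) else (acc.1, acc.2 + 1))
      (p, n)
    = (p + (data.countP (fun d => d.head? = some "e") : Nat),
       n + ((data.length : Int) - (data.countP (fun d => d.head? = some "e") : Nat))) := by
  induction data generalizing p n with
  | nil => simp
  | cons h t ih =>
    have hc : (t.countP (fun d => d.head? = some "e") : Int) ≤ (t.length : Int) := by
      exact_mod_cast List.countP_le_length
    by_cases hh : h.head? = some "e" <;>
      simp [List.foldl, hh, ih] <;> ring_nf

theorem CountVal_alt_closed (data : List (List String)) :
    CountVal_alt data
    = (((data.countP (fun d => d.head? = some "e") : Nat) : Int),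
       (data.length : Int) - ((data.countP (fun d => d.head? = some "e") : Nat) : Int)) := by
  fun_induction CountVal_alt data with
  | case1 => simp
  | case2 d hh => simp [hh]
  | case3 d hh => simp [hh]
  | case4 a b t _mid ih4 _ _ ih1 =>
    have ih4' : CountVal_alt ((a :: b :: t).take ((a :: b :: t).length / 2))
        = (((((a :: b :: t).take ((a :: b :: t).length / 2)).countP
              (fun d => d.head? = some "e") : Nat) : Int),
           (((a :: b :: t).take ((a :: b :: t).length / 2)).length : Int)
             - ((((a :: b :: t).take ((a :: b :: t).length / 2)).countP
                  (fun d => d.head? = some "e") : Nat) : Int)) := ih4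
    have ih1' : CountVal_alt ((a :: b :: t).drop ((a :: b :: t).length / 2))
        = (((((a :: b :: t).drop ((a :: b :: t).length / 2)).countP
              (fun d => d.head? = some "e") : Nat) : Int),
           (((a :: b :: t).drop ((a :: b :: t).length / 2)).length : Int)
             - ((((a :: b :: t).drop ((a :: b :: t).length / 2)).countP
                  (fun d => d.head? = some "e") : Nat) : Int)) := ih1
    simp only [ih4', ih1']
    have hsplit := List.take_append_drop ((a :: b :: t).length / 2) (a :: b :: t)
    have hcnt : (a :: b :: t).countP (fun d => d.head? = some "e")
        = ((a :: b :: t).take ((a :: b :: t).length / 2)).countP (fun d => d.head? = some "e")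
          + ((a :: b :: t).drop ((a :: b :: t).length / 2)).countP (fun d => d.head? = some "e") := by
      conv_lhs => rw [← hsplit]
      rw [List.countP_append]
    have hlen : (a :: b :: t).length
        = ((a :: b :: t).take ((a :: b :: t).length / 2)).length
          + ((a :: b :: t).drop ((a :: b :: t).length / 2)).length := by
      conv_lhs => rw [← hsplit]
      rw [List.length_append]
    refine Prod.ext ?_ ?_
    · rw [hcnt]; push_cast; ring
    · rw [hcnt]; push_cast; omega

-- ===== VERDICT (by name: the statement is the Claim_ definition above) =====
theorem CountVal_spec : Claim_equal_CountVal := by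
  intro data _ _
  unfold Spec_CountVal CountVal
  rw [CountVal_alt_closed, CountVal_foldl]
  simp
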